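-- pv_equiv track=rewrite | github.com/jhornung97/haa_analysis | Scripts/utility.py | duplicate_chars
-- ===== SOURCE A (Python) =====
-- def duplicate_chars(strings):
--     seen = set()
--     for string in strings:
--         for char in string:
--             if char in seen:
--                 return True
--             seen.add(char)
--     return False
-- ===== SOURCE B (Python) =====
-- def duplicate_chars(strings):
--     chars = [c for s in strings for c in s]
--     return len(chars) != len(set(chars))
-- ===== Notes on version B (the rewrite author's own statement) =====
-- stated objective: simpler
-- what changed: Replaces the incremental seen-set loop with early exit by building the full character list once (nested comprehension) and deciding via a single length-vs-set-size comparison.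
import Mathlib
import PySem

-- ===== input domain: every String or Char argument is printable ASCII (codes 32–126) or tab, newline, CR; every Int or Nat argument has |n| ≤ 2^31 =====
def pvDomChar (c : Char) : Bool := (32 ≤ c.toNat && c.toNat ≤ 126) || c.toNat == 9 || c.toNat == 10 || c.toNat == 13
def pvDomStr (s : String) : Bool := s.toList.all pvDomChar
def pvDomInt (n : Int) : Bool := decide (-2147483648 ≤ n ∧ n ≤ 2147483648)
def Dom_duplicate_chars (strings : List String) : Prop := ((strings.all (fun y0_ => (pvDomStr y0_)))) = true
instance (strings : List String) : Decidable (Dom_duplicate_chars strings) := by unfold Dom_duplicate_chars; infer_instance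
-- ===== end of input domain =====

-- B builds the whole character list once and decides with one size comparison, replacing A's
-- incremental seen-set loop with early exit (objective: simpler decomposition, same cost).

-- ===== PORT A =====
-- inner 'for char in string' loop: none = 'return True' fired, some seen' = loop finished
def pvInnerA : List Char → PySem.Set Char → Option (PySem.Set Char)
  | [], seen => some seen
  | c :: cs, seen =>
      if PySem.Set.contains seen c then none
      else pvInnerA cs (PySem.Set.add seen c)

-- outer 'for string in strings' loop
def pvOuterA : List String → PySem.Set Char → Bool
  | [], _ => false
  | s :: rest, seen =>
      match pvInnerA s.toList seen with
      | none => true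
      | some seen' => pvOuterA rest seen'

def duplicate_chars (strings : List String) : Bool :=
  pvOuterA strings PySem.Set.empty

-- ===== PORT B =====
def duplicate_chars_alt (strings : List String) : Bool :=
  let chars := strings.flatMap (fun s => s.toList)   -- [c for s in strings for c in s]
  decide (chars.length ≠ (PySem.Set.ofList chars).length)

-- ===== PRECONDITION & SPEC =====
def Spec_duplicate_chars (strings : List String) (out : Bool) : Prop := out = duplicate_chars_alt strings
instance (strings : List String) (out : Bool) : Decidable (Spec_duplicate_chars strings out) := by unfold Spec_duplicate_chars; infer_instance

-- ===== CLAIM (what is proved, stated in full; the proofs are below) =====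
def Claim_equal_duplicate_chars : Prop := ∀ (strings : List String), Dom_duplicate_chars strings → Spec_duplicate_chars strings (duplicate_chars strings)

-- ===== LEMMAS AND PROOFS =====

-- A's nested loops, flattened to one loop over the concatenated characters
def pvFlatA : List Char → PySem.Set Char → Bool
  | [], _ => false
  | c :: cs, seen =>
      if PySem.Set.contains seen c then true
      else pvFlatA cs (PySem.Set.add seen c)

theorem pvInner_flat (cs rest : List Char) (seen : PySem.Set Char) :
    (match pvInnerA cs seen with
     | none => true
     | some seen' => pvFlatA rest seen') = pvFlatA (cs ++ rest) seen := by
  induction cs generalizing seen with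
  | nil => simp [pvInnerA]
  | cons c cs ih =>
      simp only [pvInnerA, List.cons_append, pvFlatA]
      by_cases h : c ∈ seen
      · simp [h]
      · simp [h, ih]

theorem pvOuter_flat (strings : List String) (seen : PySem.Set Char) :
    pvOuterA strings seen = pvFlatA (strings.flatMap (fun s => s.toList)) seen := by
  induction strings generalizing seen with
  | nil => simp [pvOuterA, pvFlatA]
  | cons s rest ih =>
      simp only [pvOuterA, List.flatMap_cons]
      rw [← pvInner_flat s.toList (rest.flatMap (fun s => s.toList)) seen]
      cases pvInnerA s.toList seen with
      | none => rfl
      | some seen' => simp [ih]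

theorem pvUpdate_len_le (cs : List Char) (seen : PySem.Set Char) :
    (PySem.Set.update seen cs).length ≤ seen.length + cs.length := by
  induction cs generalizing seen with
  | nil => simp [PySem.Set.update]
  | cons c cs ih =>
      have h := ih (PySem.Set.add seen c)
      have hadd : (PySem.Set.add seen c).length ≤ seen.length + 1 := by
        by_cases hc : c ∈ seen <;> simp [PySem.Set.add, PySem.Set.contains, hc]
      calc (PySem.Set.update seen (c :: cs)).length
          = (PySem.Set.update (PySem.Set.add seen c) cs).length := by
            simp [PySem.Set.update]
        _ ≤ (PySem.Set.add seen c).length + cs.length := ih _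
        _ ≤ seen.length + (c :: cs).length := by simp [List.length_cons]; omega

theorem pvFlat_len (cs : List Char) (seen : PySem.Set Char) :
    pvFlatA cs seen = decide ((PySem.Set.update seen cs).length ≠ seen.length + cs.length) := by
  induction cs generalizing seen with
  | nil => simp [pvFlatA, PySem.Set.update]
  | cons c cs ih =>
      simp only [pvFlatA]
      by_cases h : c ∈ seen
      · have hadd : PySem.Set.add seen c = seen := by simp [PySem.Set.add, PySem.Set.contains, h]
        have hle := pvUpdate_len_le cs seen
        have hup : PySem.Set.update seen (c :: cs) = PySem.Set.update seen cs := by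
          simp [PySem.Set.update, hadd]
        simp [h]
        omega
      · have hadd : (PySem.Set.add seen c).length = seen.length + 1 := by
          simp [PySem.Set.add, PySem.Set.contains, h]
        have hcond : ¬ PySem.Set.contains seen c := by simpa [PySem.Set.contains] using h
        rw [if_neg hcond, ih]
        have : (PySem.Set.update seen (c :: cs)) = PySem.Set.update (PySem.Set.add seen c) cs := by
          simp [PySem.Set.update]
        rw [this]
        simp only [hadd, List.length_cons]
        by_cases hne : (PySem.Set.update (PySem.Set.add seen c) cs).length = seen.length + 1 + cs.length
        · simp [hne]; omega
        · simp only [ne_eq, hne, not_false_iff, decide_true]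
          have : (PySem.Set.update (PySem.Set.add seen c) cs).length ≠ seen.length + (cs.length + 1) := by omega
          simp [this]

-- ===== VERDICT (by name: the statement is the Claim_ definition above) =====
theorem duplicate_chars_spec : Claim_equal_duplicate_chars := by
  intro strings _
  unfold Spec_duplicate_chars duplicate_chars duplicate_chars_alt
  rw [pvOuter_flat, pvFlat_len]
  rw [show PySem.Set.update PySem.Set.empty (strings.flatMap (fun s => s.toList))
        = PySem.Set.ofList (strings.flatMap (fun s => s.toList)) from rfl]
  simp only [PySem.Set.empty, List.length_nil, Nat.zero_add]
  exact decide_eq_decide.mpr ne_comm
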